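-- pv_equiv track=rewrite | github.com/GianBala/Sistema-Academia_Metodos-de-Projeto-de-Software | src/utils/Tratamentos/Tratamento_Senha.py | verificar_tipos_caracteres
-- ===== SOURCE A (Python) =====
-- def verificar_tipos_caracteres(senha: str):
--     tipos = 0
--
--     maiuscula = False
--     minuscula = False
--     numero = False
--     n_alfanumero = False
--
--     for char in senha:
--         if tipos >= 3:
--             break
--
--         if char.isalpha() and char.lower() == char and minuscula == False:
--             tipos += 1
--             minuscula = True
--         elif char.isalpha() and char.upper() == char and maiuscula == False:
--             tipos += 1
--             maiuscula = True
--         elif char.isdigit() and numero == False: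
--             tipos += 1
--             numero = True
--         elif not char.isdigit() and not char.isalpha() and n_alfanumero == False:
--             tipos += 1
--             n_alfanumero = True
--
--     if tipos >= 3:
--         return True
--     else:
--         return False
-- ===== SOURCE B (Python) =====
-- def verificar_tipos_caracteres(senha: str):
--     has_lower = any(c.isalpha() and c.lower() == c for c in senha)
--     has_upper = any(c.isalpha() and c.lower() != c and c.upper() == c for c in senha)
--     has_digit = any(c.isdigit() for c in senha)
--     has_other = any(not c.isdigit() and not c.isalpha() for c in senha)
--     return (has_lower + has_upper + has_digit + has_other) >= 3
-- ===== Notes on version B (the rewrite author's own statement) =====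
-- stated objective: simpler
-- what changed: Replaces the single stateful loop (four flags, a counter and an early break) with four independent existence scans whose boolean results are summed and compared to 3.
import Mathlib
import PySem

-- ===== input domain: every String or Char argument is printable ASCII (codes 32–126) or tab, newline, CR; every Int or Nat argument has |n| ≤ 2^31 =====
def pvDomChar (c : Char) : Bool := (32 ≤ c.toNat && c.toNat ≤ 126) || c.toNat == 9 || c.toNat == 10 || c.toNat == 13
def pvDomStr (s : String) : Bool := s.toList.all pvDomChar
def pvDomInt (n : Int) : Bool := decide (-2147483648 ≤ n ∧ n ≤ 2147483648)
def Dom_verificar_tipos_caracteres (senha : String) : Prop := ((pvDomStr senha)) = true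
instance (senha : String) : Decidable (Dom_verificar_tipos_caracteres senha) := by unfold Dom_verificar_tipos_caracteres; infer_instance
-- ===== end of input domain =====

-- B replaces A's single stateful loop (four flags + counter + early break) with four
-- independent existence scans summed and compared to 3 (objective: simpler).

-- ===== PORT A =====
-- A's loop: state (tipos, maiuscula, minuscula, numero, n_alfanumero); 'break' when tipos >= 3
-- is the first check of each iteration, so the recursion returns tipos at that point.
def pvLoopA : List Char → Int → Bool → Bool → Bool → Bool → Int
  | [], tipos, _, _, _, _ => tipos
  | c :: cs, tipos, ma, mi, nu, na =>
    if 3 ≤ tipos then tipos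
    else if PySem.Chars.isalpha c && (PySem.Chars.lowerChar c == c) && !mi then
      pvLoopA cs (tipos + 1) ma true nu na
    else if PySem.Chars.isalpha c && (PySem.Chars.upperChar c == c) && !ma then
      pvLoopA cs (tipos + 1) true mi nu na
    else if PySem.Chars.isdigit c && !nu then
      pvLoopA cs (tipos + 1) ma mi true na
    else if !PySem.Chars.isdigit c && !PySem.Chars.isalpha c && !na then
      pvLoopA cs (tipos + 1) ma mi nu true
    else
      pvLoopA cs tipos ma mi nu na

def verificar_tipos_caracteres (senha : String) : Bool :=
  decide (3 ≤ pvLoopA senha.toList 0 false false false false)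

-- ===== PORT B =====
-- bool → int as Python's bool-to-int coercion in the sum
def pvB2i (b : Bool) : Int := if b then 1 else 0

def verificar_tipos_caracteres_alt (senha : String) : Bool :=
  let cs := senha.toList
  let has_lower := cs.any (fun c => PySem.Chars.isalpha c && (PySem.Chars.lowerChar c == c))
  let has_upper := cs.any (fun c => PySem.Chars.isalpha c && (PySem.Chars.lowerChar c != c) && (PySem.Chars.upperChar c == c))
  let has_digit := cs.any (fun c => PySem.Chars.isdigit c)
  let has_other := cs.any (fun c => !PySem.Chars.isdigit c && !PySem.Chars.isalpha c)
  decide (3 ≤ pvB2i has_lower + pvB2i has_upper + pvB2i has_digit + pvB2i has_other)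

-- ===== PRECONDITION & SPEC =====
def Spec_verificar_tipos_caracteres (senha : String) (out : Bool) : Prop := out = verificar_tipos_caracteres_alt senha
instance (senha : String) (out : Bool) : Decidable (Spec_verificar_tipos_caracteres senha out) := by unfold Spec_verificar_tipos_caracteres; infer_instance

-- ===== CLAIM (what is proved, stated in full; the proofs are below) =====
def Claim_equal_verificar_tipos_caracteres : Prop := ∀ (senha : String), Dom_verificar_tipos_caracteres senha → Spec_verificar_tipos_caracteres senha (verificar_tipos_caracteres senha)

-- ===== LEMMAS AND PROOFS =====

-- character-class facts (exact over all of Char, given PySem's ASCII semantics)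

theorem pv_toNat_ofNat (n : Nat) (h : n < 55296) : (Char.ofNat n).toNat = n := by
  have hv : n.isValidChar := Or.inl h
  rw [Char.ofNat, dif_pos hv]
  simp [Char.toNat, Char.ofNatAux]

theorem pv_isupper_range (c : Char) (h : PySem.Chars.isupper c = true) :
    65 ≤ c.toNat ∧ c.toNat ≤ 90 := by
  simp only [PySem.Chars.isupper, Bool.and_eq_true, decide_eq_true_eq, Char.le_def] at h
  exact h

theorem pv_islower_range (c : Char) (h : PySem.Chars.islower c = true) :
    97 ≤ c.toNat ∧ c.toNat ≤ 122 := by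
  simp only [PySem.Chars.islower, Bool.and_eq_true, decide_eq_true_eq, Char.le_def] at h
  exact h

theorem pv_lowerChar_ne (c : Char) (h : PySem.Chars.isupper c = true) :
    (PySem.Chars.lowerChar c == c) = false := by
  simp only [PySem.Chars.lowerChar, h, if_true, beq_eq_false_iff_ne, ne_eq]
  intro he
  have hr := pv_isupper_range c h
  have h2 : (Char.ofNat (c.toNat + 32)).toNat = c.toNat + 32 := pv_toNat_ofNat _ (by omega)
  rw [he] at h2; omega

theorem pv_upperChar_ne (c : Char) (h : PySem.Chars.islower c = true) :
    (PySem.Chars.upperChar c == c) = false := by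
  simp only [PySem.Chars.upperChar, h, if_true, beq_eq_false_iff_ne, ne_eq]
  intro he
  have hr := pv_islower_range c h
  have h2 : (Char.ofNat (c.toNat - 32)).toNat = c.toNat - 32 := pv_toNat_ofNat _ (by omega)
  rw [he] at h2; omega

theorem pv_not_both (c : Char) (h : PySem.Chars.islower c = true) :
    PySem.Chars.isupper c = false := by
  by_contra hc
  have hu := pv_isupper_range c (by revert hc; cases PySem.Chars.isupper c <;> simp)
  have hl := pv_islower_range c h
  omega

theorem pv_upper_not_lower (c : Char) (h : PySem.Chars.isupper c = true) :
    PySem.Chars.islower c = false := by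
  by_contra hc
  have hl := pv_islower_range c (by revert hc; cases PySem.Chars.islower c <;> simp)
  have hu := pv_isupper_range c h
  omega

-- A's and B's lowercase test both reduce to islower
theorem pv_lower_eq (c : Char) :
    (PySem.Chars.isalpha c && (PySem.Chars.lowerChar c == c)) = PySem.Chars.islower c := by
  unfold PySem.Chars.isalpha
  cases hu : PySem.Chars.isupper c
  · cases hl : PySem.Chars.islower c
    · simp
    · simp [PySem.Chars.lowerChar, hu]
  · simp [pv_lowerChar_ne c hu, pv_upper_not_lower c hu]

-- A's uppercase test reduces to isupper
theorem pv_upperA_eq (c : Char) :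
    (PySem.Chars.isalpha c && (PySem.Chars.upperChar c == c)) = PySem.Chars.isupper c := by
  unfold PySem.Chars.isalpha
  cases hl : PySem.Chars.islower c
  · cases hu : PySem.Chars.isupper c
    · simp
    · simp [hu, PySem.Chars.upperChar, hl]
  · simp [pv_upperChar_ne c hl, pv_not_both c hl]

-- B's uppercase test also reduces to isupper
theorem pv_upperB_eq (c : Char) :
    (PySem.Chars.isalpha c && (PySem.Chars.lowerChar c != c) && (PySem.Chars.upperChar c == c))
      = PySem.Chars.isupper c := by
  cases hu : PySem.Chars.isupper c
  · cases hl : PySem.Chars.islower c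
    · simp [PySem.Chars.isalpha, hu, hl]
    · simp [pv_upperChar_ne c hl]
  · have hl : PySem.Chars.islower c = false := pv_upper_not_lower c hu
    have hne := pv_lowerChar_ne c hu
    simp only [beq_eq_false_iff_ne, ne_eq] at hne
    simp [PySem.Chars.isalpha, hu, hl, hne, PySem.Chars.upperChar]

theorem pv_isdigit_range (c : Char) (h : PySem.Chars.isdigit c = true) :
    48 ≤ c.toNat ∧ c.toNat ≤ 57 := by
  simp only [PySem.Chars.isdigit, Bool.and_eq_true, decide_eq_true_eq, Char.le_def] at h
  exact h

theorem pv_digit_not_alpha (c : Char) (h : PySem.Chars.isdigit c = true) :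
    PySem.Chars.isalpha c = false := by
  have hr := pv_isdigit_range c h
  unfold PySem.Chars.isalpha
  cases hu : PySem.Chars.isupper c
  · cases hl : PySem.Chars.islower c
    · rfl
    · have := pv_islower_range c hl
      omega
  · have := pv_isupper_range c hu
    omega

theorem pv_sum_mono (ma mi nu na x1 x2 x3 x4 : Bool)
    (h : 3 ≤ pvB2i ma + pvB2i mi + pvB2i nu + pvB2i na) :
    3 ≤ pvB2i (mi || x1) + pvB2i (ma || x2) + pvB2i (nu || x3) + pvB2i (na || x4) := by
  revert h
  cases ma <;> cases mi <;> cases nu <;> cases na <;> cases x1 <;> cases x2 <;> cases x3 <;> cases x4 <;> decide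

-- main loop characterisation: with the counter equal to the number of set flags,
-- A's loop reaches 3 iff the OR of each flag with its existence scan sums to ≥ 3
theorem pv_loop_eq (cs : List Char) : ∀ (ma mi nu na : Bool) (tipos : Int),
    tipos = pvB2i ma + pvB2i mi + pvB2i nu + pvB2i na →
    ((3 ≤ pvLoopA cs tipos ma mi nu na) ↔
      (3 ≤ pvB2i (mi || cs.any (fun c => PySem.Chars.isalpha c && (PySem.Chars.lowerChar c == c)))
         + pvB2i (ma || cs.any (fun c => PySem.Chars.isalpha c && (PySem.Chars.lowerChar c != c) && (PySem.Chars.upperChar c == c)))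
         + pvB2i (nu || cs.any (fun c => PySem.Chars.isdigit c))
         + pvB2i (na || cs.any (fun c => !PySem.Chars.isdigit c && !PySem.Chars.isalpha c)))) := by
  induction cs with
  | nil =>
    intro ma mi nu na tipos ht
    simp only [pvLoopA, List.any_nil, Bool.or_false]
    omega
  | cons c cs ih =>
    intro ma mi nu na tipos ht
    simp only [List.any_cons, pv_lower_eq, pv_upperB_eq]
    rw [pvLoopA.eq_def]
    simp only [pv_lower_eq, pv_upperA_eq]
    by_cases h3 : (3 ≤ tipos)
    · rw [if_pos h3]
      rw [ht] at h3
      constructor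
      · intro _
        exact pv_sum_mono _ _ _ _ _ _ _ _ h3
      · intro _
        omega
    · rw [if_neg h3]
      cases hl : PySem.Chars.islower c
      · cases hu : PySem.Chars.isupper c
        · cases hd : PySem.Chars.isdigit c
          · -- "other" category
            have ha : PySem.Chars.isalpha c = false := by
              simp [PySem.Chars.isalpha, hl, hu]
            cases na
            · simp only [hl, hu, hd, ha]
              simp only [Bool.false_and, Bool.not_false, Bool.true_and, Bool.and_true,
                Bool.false_eq_true, if_false, if_true, Bool.false_or, Bool.true_or, Bool.or_true]
              rw [ih ma mi nu true (tipos + 1) (by simp [pvB2i] at ht ⊢; omega)]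
              simp [pv_lower_eq, pv_upperB_eq]
            · simp only [hl, hu, hd, ha]
              simp only [Bool.false_and, Bool.not_true, Bool.true_and, Bool.and_false,
                Bool.false_eq_true, if_false, Bool.false_or, Bool.true_or, Bool.or_true]
              rw [ih ma mi nu true tipos (by simp [pvB2i] at ht ⊢; omega)]
              simp [pv_lower_eq, pv_upperB_eq]
          · -- digit category
            have ha : PySem.Chars.isalpha c = false := pv_digit_not_alpha c hd
            cases nu
            · simp only [hl, hu, hd, ha]
              simp only [Bool.false_and, Bool.not_false, Bool.true_and, Bool.and_true,
                Bool.not_true, Bool.false_eq_true, if_false, if_true, Bool.false_or,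
                Bool.true_or, Bool.or_true]
              rw [ih ma mi true na (tipos + 1) (by simp [pvB2i] at ht ⊢; omega)]
              simp [pv_lower_eq, pv_upperB_eq]
            · simp only [hl, hu, hd, ha]
              simp only [Bool.false_and, Bool.not_true, Bool.true_and, Bool.and_false,
                Bool.false_eq_true, if_false, Bool.false_or, Bool.true_or, Bool.or_true]
              rw [ih ma mi true na tipos (by simp [pvB2i] at ht ⊢; omega)]
              simp [pv_lower_eq, pv_upperB_eq]
        · -- uppercase category
          have hd : PySem.Chars.isdigit c = false := by
            by_contra hc
            have := pv_digit_not_alpha c (by revert hc; cases PySem.Chars.isdigit c <;> simp)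
            simp [PySem.Chars.isalpha, hu] at this
          have ha : PySem.Chars.isalpha c = true := by simp [PySem.Chars.isalpha, hu]
          cases ma
          · simp only [hl, hu, hd, ha]
            simp only [Bool.false_and, Bool.not_false, Bool.true_and, Bool.and_true,
              Bool.false_eq_true, if_false, if_true, Bool.false_or, Bool.true_or, Bool.or_true]
            rw [ih true mi nu na (tipos + 1) (by simp [pvB2i] at ht ⊢; omega)]
            simp [pv_lower_eq, pv_upperB_eq]
          · simp only [hl, hu, hd, ha]
            simp only [Bool.false_and, Bool.not_true, Bool.true_and, Bool.and_false,
              Bool.false_eq_true, if_false, Bool.false_or, Bool.true_or, Bool.or_true]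
            rw [ih true mi nu na tipos (by simp [pvB2i] at ht ⊢; omega)]
            simp [pv_lower_eq, pv_upperB_eq]
      · -- lowercase category
        have hu : PySem.Chars.isupper c = false := pv_not_both c hl
        have ha : PySem.Chars.isalpha c = true := by simp [PySem.Chars.isalpha, hl]
        have hd : PySem.Chars.isdigit c = false := by
          by_contra hc
          have := pv_digit_not_alpha c (by revert hc; cases PySem.Chars.isdigit c <;> simp)
          rw [this] at ha; exact absurd ha (by simp)
        cases mi
        · simp only [hl, hu, hd, ha]
          simp only [Bool.false_and, Bool.not_false, Bool.true_and, Bool.and_true,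
            Bool.false_eq_true, if_false, if_true, Bool.false_or, Bool.true_or, Bool.or_true]
          rw [ih ma true nu na (tipos + 1) (by simp [pvB2i] at ht ⊢; omega)]
          simp [pv_lower_eq, pv_upperB_eq]
        · simp only [hl, hu, hd, ha]
          simp only [Bool.false_and, Bool.not_true, Bool.true_and, Bool.and_false,
            Bool.false_eq_true, if_false, Bool.false_or, Bool.true_or, Bool.or_true]
          rw [ih ma true nu na tipos (by simp [pvB2i] at ht ⊢; omega)]
          simp [pv_lower_eq, pv_upperB_eq]

-- ===== VERDICT (by name: the statement is the Claim_ definition above) =====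
theorem verificar_tipos_caracteres_spec : Claim_equal_verificar_tipos_caracteres := by
  intro senha _
  unfold Spec_verificar_tipos_caracteres verificar_tipos_caracteres verificar_tipos_caracteres_alt
  simp only [decide_eq_decide]
  have h := pv_loop_eq senha.toList false false false false 0 (by simp [pvB2i])
  simp only [Bool.false_or] at h
  exact h
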